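-- pv_equiv track=rewrite | github.com/MaratAsh/yandex_alg_2.0 | Яндекс. Тренировки по алгоритмам 2.0, занятие 2 (B)/ex_2.py | get_max_len
-- ===== SOURCE A (Python) =====
-- def get_max_len_(b):
-- 	for i in range(len(b)):
-- 		if (b[i] == 2):
-- 			return i
-- 	return 0
--
-- def get_max_len(b):
-- 	max_len = 0
-- 	for i in range(len(b)):
-- 		if (b[i] == 1):
-- 			len_l = get_max_len_(b[i::-1])
-- 			len_r = get_max_len_(b[i::])
-- 			if len_l == 0:
-- 				if (max_len < len_r):
-- 					max_len = len_r
-- 			elif len_r == 0: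
-- 				if (max_len < len_l):
-- 					max_len = len_l
-- 			elif (max_len < min(len_r, len_l)):
-- 				max_len = min(len_r, len_l)
-- 	return max_len
-- ===== SOURCE B (Python) =====
-- def _near(b):
--     # distance from each index to the nearest 2 at or before it (None if no 2 yet)
--     res = []
--     last = None
--     for i, x in enumerate(b):
--         if x == 2:
--             last = i
--         res.append(i - last if last is not None else None)
--     return res
--
-- def get_max_len(b):
--     left = _near(b)
--     right = _near(b[::-1])[::-1]
--     best = 0
--     for i, x in enumerate(b):
--         if x == 1:
--             l, r = left[i], right[i]
--             if l is None:
--                 d = r if r is not None else 0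
--             elif r is None:
--                 d = l
--             else:
--                 d = min(l, r)
--             if d > best:
--                 best = d
--     return best
-- ===== Notes on version B (the rewrite author's own statement) =====
-- stated objective: alternative
-- what changed: A rescans the whole list leftwards and rightwards from every 1 (worst-case quadratic); B precomputes nearest-2 distances for all positions in two linear passes (one helper run forward and once on the reversed list) and combines them in a single pass.
import Mathlib
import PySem

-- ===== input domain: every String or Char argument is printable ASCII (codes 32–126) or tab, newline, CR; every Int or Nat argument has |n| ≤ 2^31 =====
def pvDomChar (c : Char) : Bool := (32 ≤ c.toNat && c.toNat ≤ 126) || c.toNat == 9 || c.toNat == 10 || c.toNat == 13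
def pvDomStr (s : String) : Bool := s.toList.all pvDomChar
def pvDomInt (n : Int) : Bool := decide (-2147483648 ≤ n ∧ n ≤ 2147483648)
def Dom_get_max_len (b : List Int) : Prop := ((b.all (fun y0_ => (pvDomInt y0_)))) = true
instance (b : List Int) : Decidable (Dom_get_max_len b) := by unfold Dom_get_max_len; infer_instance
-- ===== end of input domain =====

-- B replaces A's per-1 slice-scans by two precomputed nearest-2 passes plus one combining pass; objective: alternative algorithm.

-- ===== PORT A =====
-- helper get_max_len_: 'for i in range(len(b)): if b[i] == 2: return i; return 0'
def get_max_len_go (l : List Int) (i : Int) : Int :=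
  match l with
  | [] => 0
  | x :: xs => if x = 2 then i else get_max_len_go xs (i + 1)

def get_max_len_ (b : List Int) : Int := get_max_len_go b 0

-- main loop; b[i::-1] = (b.take (i+1)).reverse and b[i::] = b.drop i, exact for 0 ≤ i < len b
def get_max_len (b : List Int) : Int :=
  (PySem.List.enumerate b 0).foldl (fun max_len (p : Int × Int) =>
    if p.2 = 1 then
      let len_l := get_max_len_ ((b.take (p.1.toNat + 1)).reverse)
      let len_r := get_max_len_ (b.drop p.1.toNat)
      if len_l = 0 then (if max_len < len_r then len_r else max_len)
      else if len_r = 0 then (if max_len < len_l then len_l else max_len)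
      else if max_len < min len_r len_l then min len_r len_l else max_len
    else max_len) 0

-- ===== PORT B =====
-- _near: one pass recording the distance to the nearest 2 at or before each index (none if no 2 yet)
def near_go (l : List Int) (i : Int) (last : Option Int) : List (Option Int) :=
  match l with
  | [] => []
  | x :: xs =>
    let last' := if x = 2 then some i else last
    (last'.map (fun j => i - j)) :: near_go xs (i + 1) last'

def near (b : List Int) : List (Option Int) := near_go b 0 none

-- left[i] / right[i] indexing is always in range; ported with getD
def get_max_len_alt (b : List Int) : Int :=
  let left := near b
  let right := (near b.reverse).reverse
  (PySem.List.enumerate b 0).foldl (fun best (p : Int × Int) =>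
    if p.2 = 1 then
      let d : Int :=
        match left.getD p.1.toNat none, right.getD p.1.toNat none with
        | none, none => 0
        | none, some r => r
        | some l, none => l
        | some l, some r => min l r
      if d > best then d else best
    else best) 0

-- ===== PRECONDITION & SPEC =====
def Spec_get_max_len (b : List Int) (out : Int) : Prop := out = get_max_len_alt b
instance (b : List Int) (out : Int) : Decidable (Spec_get_max_len b out) := by unfold Spec_get_max_len; infer_instance

-- ===== CLAIM (what is proved, stated in full; the proofs are below) =====
def Claim_equal_get_max_len : Prop := ∀ (b : List Int), Dom_get_max_len b → Spec_get_max_len b (get_max_len b)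

-- ===== LEMMAS AND PROOFS =====

/-- index of the first 2 in a list, as an optional Int -/
def first2 : List Int → Option Int
  | [] => none
  | x :: xs => if x = 2 then some 0 else (first2 xs).map (· + 1)

lemma go_eq (l : List Int) (i : Int) :
    get_max_len_go l i = match first2 l with | some j => i + j | none => 0 := by
  induction l generalizing i with
  | nil => simp [get_max_len_go, first2]
  | cons x xs ih =>
    by_cases hx : x = 2
    · simp [get_max_len_go, first2, hx]
    · simp only [get_max_len_go, first2, if_neg hx, ih (i + 1)]
      cases first2 xs
      · simp
      · simp; ring

lemma first2_append (r : List Int) (x : Int) :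
    first2 (r ++ [x]) = match first2 r with
      | some d => some d
      | none => if x = 2 then some (r.length : Int) else none := by
  induction r with
  | nil => simp [first2]
  | cons y ys ih =>
    by_cases hy : y = 2
    · simp [first2, hy]
    · simp only [List.cons_append, first2, if_neg hy, ih]
      cases h : first2 ys with
      | some d => simp
      | none =>
        by_cases hx : x = 2 <;> simp [hx]

lemma near_go_cons (x : Int) (xs : List Int) (i : Int) (last : Option Int) :
    near_go (x :: xs) i last
      = ((if x = 2 then some i else last).map (fun j => i - j))
          :: near_go xs (i + 1) (if x = 2 then some i else last) := rfl

lemma length_near_go (l : List Int) (i : Int) (last : Option Int) :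
    (near_go l i last).length = l.length := by
  induction l generalizing i last with
  | nil => simp [near_go]
  | cons x xs ih => simp [near_go, ih]

lemma near_go_spec (l : List Int) (i : Int) (last : Option Int) (k : Nat) (hk : k < l.length) :
    (near_go l i last)[k]? = some (match first2 ((l.take (k + 1)).reverse) with
      | some d => some d
      | none => last.map (fun j => i + (k : Int) - j)) := by
  induction l generalizing i last k with
  | nil => simp at hk
  | cons x xs ih =>
    cases k with
    | zero =>
      by_cases hx : x = 2
      · simp [near_go, first2, hx]
      · simp [near_go, first2, hx]
    | succ k =>
      have hk' : k < xs.length := by simpa using hk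
      have htake : ((x :: xs).take (k + 1 + 1)).reverse
          = (xs.take (k + 1)).reverse ++ [x] := by simp
      rw [htake, first2_append]
      have hlen : ((xs.take (k + 1)).length : Int) = (k + 1 : Int) := by
        simp [Nat.min_eq_left hk']
      rw [near_go_cons, List.getElem?_cons_succ]
      by_cases hx : x = 2
      · rw [if_pos hx, ih (i + 1) (some i) k hk']
        cases h : first2 ((xs.take (k + 1)).reverse) with
        | some d => simp
        | none => simp [hx]; omega
      · rw [if_neg hx, ih (i + 1) last k hk']
        cases h : first2 ((xs.take (k + 1)).reverse) with
        | some d => simp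
        | none =>
          simp [hx]
          cases last with
          | none => rfl
          | some j => simp; ring

lemma near_spec (b : List Int) (k : Nat) (hk : k < b.length) :
    (near b)[k]? = some (first2 ((b.take (k + 1)).reverse)) := by
  rw [near, near_go_spec b 0 none k hk]
  cases first2 ((b.take (k + 1)).reverse) <;> simp

lemma right_spec (b : List Int) (k : Nat) (hk : k < b.length) :
    ((near b.reverse).reverse)[k]? = some (first2 (b.drop k)) := by
  have hlen : (near b.reverse).length = b.length := by
    simp [near, length_near_go]
  rw [List.getElem?_reverse (by omega : k < (near b.reverse).length)]
  rw [hlen]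
  have hk' : b.length - 1 - k < b.reverse.length := by simp; omega
  rw [near_spec b.reverse _ hk']
  congr 2
  have : b.length - 1 - k + 1 = b.length - k := by omega
  rw [this]
  rw [← List.reverse_drop]
  simp

lemma first2_nonneg (l : List Int) (j : Int) (h : first2 l = some j) : 0 ≤ j := by
  induction l generalizing j with
  | nil => simp [first2] at h
  | cons x xs ih =>
    by_cases hx : x = 2
    · simp [first2, hx] at h; omega
    · simp [first2, hx] at h
      obtain ⟨d, hd, rfl⟩ := h
      have := ih d hd; omega

theorem get_max_len_eq_alt (b : List Int) : get_max_len b = get_max_len_alt b := by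
  simp only [get_max_len, get_max_len_alt]
  apply PySem.List.foldl_congr_mem
  intro acc p hp
  rw [PySem.List.mem_enumerate_iff] at hp
  obtain ⟨k, hk, rfl⟩ := hp
  simp only [zero_add]
  by_cases hx : b[k] = 1
  · have htoNat : ((k : Int)).toNat = k := Int.toNat_natCast k
    have hl : (near b).getD k none = first2 ((b.take (k + 1)).reverse) := by
      rw [List.getD_eq_getElem?_getD, near_spec b k hk]; rfl
    have hr : ((near b.reverse).reverse).getD k none = first2 (b.drop k) := by
      rw [List.getD_eq_getElem?_getD, right_spec b k hk]; rfl
    have htake : (b.take (k + 1)).reverse = b[k] :: (b.take k).reverse := by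
      rw [List.take_add_one]
      simp [List.getElem?_eq_getElem hk]
    have hdrop : b.drop k = b[k] :: b.drop (k + 1) := List.drop_eq_getElem_cons hk
    have hne2 : b[k] ≠ 2 := by rw [hx]; decide
    have hlshape : first2 ((b.take (k + 1)).reverse) = (first2 ((b.take k).reverse)).map (· + 1) := by
      rw [htake]; simp [first2, hne2]
    have hrshape : first2 (b.drop k) = (first2 (b.drop (k + 1))).map (· + 1) := by
      rw [hdrop]; simp [first2, hne2]
    simp only [hx, htoNat, hl, hr, get_max_len_, go_eq]
    cases hL : first2 ((b.take k).reverse) with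
    | none =>
      cases hR : first2 (b.drop (k + 1)) with
      | none => simp [hlshape, hrshape, hL, hR]
      | some r =>
        have hr1 : 0 ≤ r := first2_nonneg _ _ hR
        simp only [hlshape, hrshape, hL, hR, Option.map_none, Option.map_some]
        split_ifs <;> linarith
    | some l =>
      have hl1 : 0 ≤ l := first2_nonneg _ _ hL
      cases hR : first2 (b.drop (k + 1)) with
      | none =>
        simp only [hlshape, hrshape, hL, hR, Option.map_none, Option.map_some, min_def]
        split_ifs <;> linarith
      | some r =>
        have hr1 : 0 ≤ r := first2_nonneg _ _ hR
        simp only [hlshape, hrshape, hL, hR, Option.map_some, min_def]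
        split_ifs <;> linarith
  · simp [hx]

-- ===== VERDICT (by name: the statement is the Claim_ definition above) =====
theorem get_max_len_spec : Claim_equal_get_max_len := by
  intro b _
  unfold Spec_get_max_len
  exact get_max_len_eq_alt b
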